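-- pv_equiv track=rewrite | github.com/QuartumSE/quartumse-internal | src/quartumse/analysis/posthoc_benchmark.py | compute_direct_measurement_coverage
-- ===== SOURCE A (Python) =====
-- def compute_direct_measurement_coverage(
--     observable_ids: list[str],
--     measurement_bases: dict[str, set[str]],
-- ) -> tuple[set[str], set[str]]:
--     """Determine which observables are covered by existing measurement bases.
--
--     For direct measurement, an observable is "covered" if it can be estimated
--     from an existing measurement basis (i.e., it commutes with/is compatible
--     with measurements already taken).
--
--     Args:
--         observable_ids: Observables we want to estimate
--         measurement_bases: Dict mapping basis_id -> set of compatible observable_ids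
--
--     Returns:
--         Tuple of (covered_obs_ids, uncovered_obs_ids)
--     """
--     requested = set(observable_ids)
--     covered = set()
--
--     for _basis_id, compatible in measurement_bases.items():
--         covered.update(requested & compatible)
--
--     uncovered = requested - covered
--     return covered, uncovered
-- ===== SOURCE B (Python) =====
-- def compute_direct_measurement_coverage(
--     observable_ids: list[str],
--     measurement_bases: dict[str, set[str]],
-- ) -> tuple[set[str], set[str]]:
--     covered = set()
--     uncovered = set()
--     bases = list(measurement_bases.values())
--     for o in observable_ids:
--         if any(o in compatible for compatible in bases):
--             covered.add(o)
--         else: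
--             uncovered.add(o)
--     return covered, uncovered
-- ===== Notes on version B (the rewrite author's own statement) =====
-- stated objective: alternative
-- what changed: Inverts the loop structure: B makes one pass over the requested observable ids, classifying each directly into covered or uncovered by a short-circuiting any() membership probe across the bases, instead of A's per-basis intersection accumulation into a covered set followed by a final set difference.
import Mathlib
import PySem

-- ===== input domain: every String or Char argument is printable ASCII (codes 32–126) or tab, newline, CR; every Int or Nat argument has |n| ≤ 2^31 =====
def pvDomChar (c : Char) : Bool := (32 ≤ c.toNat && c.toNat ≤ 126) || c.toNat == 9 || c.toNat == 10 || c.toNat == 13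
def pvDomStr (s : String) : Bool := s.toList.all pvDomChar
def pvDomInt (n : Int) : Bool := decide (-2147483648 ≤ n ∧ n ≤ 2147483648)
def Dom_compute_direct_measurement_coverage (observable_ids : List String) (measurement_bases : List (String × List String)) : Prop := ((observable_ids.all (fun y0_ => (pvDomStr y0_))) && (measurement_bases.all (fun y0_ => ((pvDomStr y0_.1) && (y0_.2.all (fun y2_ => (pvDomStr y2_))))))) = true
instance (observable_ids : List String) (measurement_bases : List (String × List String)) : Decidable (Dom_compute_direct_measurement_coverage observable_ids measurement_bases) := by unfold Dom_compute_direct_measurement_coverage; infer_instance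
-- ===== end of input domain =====

-- B inverts the loop structure: one pass over the requested ids classifying each into
-- covered/uncovered by a short-circuiting membership probe across the bases, instead of
-- A's per-basis intersection accumulation plus a final set difference (alternative, same cost).
-- Both Pythons return unordered sets; both ports list each result set in sorted order —
-- a shared canonical representation of the set values, not a step of either algorithm.

-- ===== PORT A =====
def compute_direct_measurement_coverage (observable_ids : List String) (measurement_bases : List (String × List String)) : List String × List String :=
  let requested : PySem.Set String := PySem.Set.ofList observable_ids
  let covered : PySem.Set String :=
    measurement_bases.foldl
      (fun cov p => PySem.Set.update cov (PySem.Set.inter requested p.2))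
      PySem.Set.empty
  let uncovered : PySem.Set String := PySem.Set.diff requested covered
  (PySem.List.sorted covered (fun x => x) false, PySem.List.sorted uncovered (fun x => x) false)

-- ===== PORT B =====
def compute_direct_measurement_coverage_alt (observable_ids : List String) (measurement_bases : List (String × List String)) : List String × List String :=
  let bases : List (List String) := measurement_bases.map (fun p => p.2)
  let acc : PySem.Set String × PySem.Set String :=
    observable_ids.foldl
      (fun acc o =>
        if bases.any (fun compatible => PySem.Set.contains compatible o) then
          (PySem.Set.add acc.1 o, acc.2)
        else
          (acc.1, PySem.Set.add acc.2 o))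
      (PySem.Set.empty, PySem.Set.empty)
  (PySem.List.sorted acc.1 (fun x => x) false, PySem.List.sorted acc.2 (fun x => x) false)

-- ===== PRECONDITION & SPEC =====
def Spec_compute_direct_measurement_coverage (observable_ids : List String) (measurement_bases : List (String × List String)) (out : List String × List String) : Prop := out = compute_direct_measurement_coverage_alt observable_ids measurement_bases
instance (observable_ids : List String) (measurement_bases : List (String × List String)) (out : List String × List String) : Decidable (Spec_compute_direct_measurement_coverage observable_ids measurement_bases out) := by unfold Spec_compute_direct_measurement_coverage; infer_instance

-- ===== CLAIM (what is proved, stated in full; the proofs are below) =====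
def Claim_equal_compute_direct_measurement_coverage : Prop := ∀ (observable_ids : List String) (measurement_bases : List (String × List String)), Dom_compute_direct_measurement_coverage observable_ids measurement_bases → Spec_compute_direct_measurement_coverage observable_ids measurement_bases (compute_direct_measurement_coverage observable_ids measurement_bases)

-- ===== LEMMAS AND PROOFS =====

-- A's per-basis accumulation is one update with the concatenated chunks.
theorem pv_foldl_update {α β : Type} [BEq α] (l : List β) (g : β → List α) :
    ∀ s : PySem.Set α,
      l.foldl (fun cov p => PySem.Set.update cov (g p)) s = PySem.Set.update s (l.flatMap g) := by
  induction l with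
  | nil => intro s; rfl
  | cons b l ih =>
    intro s
    rw [List.foldl_cons, List.flatMap_cons, PySem.Set.update_append, ih]

-- B's classifying fold is two independent conditional-add folds.
theorem pv_foldl_classify {α : Type} [BEq α] (xs : List α) (c : α → Bool) :
    xs.foldl
      (fun (acc : PySem.Set α × PySem.Set α) o =>
        if c o then (PySem.Set.add acc.1 o, acc.2) else (acc.1, PySem.Set.add acc.2 o))
      (PySem.Set.empty, PySem.Set.empty)
    = (PySem.Set.ofList (xs.filter c), PySem.Set.ofList (xs.filter (fun o => !c o))) := by
  have hstep :
      (fun (acc : PySem.Set α × PySem.Set α) o =>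
        if c o then (PySem.Set.add acc.1 o, acc.2) else (acc.1, PySem.Set.add acc.2 o))
      = fun (acc : PySem.Set α × PySem.Set α) o =>
          ((fun s e => if c e then PySem.Set.add s e else s) acc.1 o,
           (fun s e => if (fun x => !c x) e then PySem.Set.add s e else s) acc.2 o) := by
    funext acc o
    by_cases h : c o = true <;> simp [h]
  rw [hstep, PySem.List.foldl_prod_mk (f := fun s e => if c e = true then PySem.Set.add s e else s)
    (g := fun s e => if (fun x => !c x) e = true then PySem.Set.add s e else s)]
  rw [← List.foldl_filter, ← List.foldl_filter]
  rfl

-- ===== VERDICT (by name: the statement is the Claim_ definition above) =====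
theorem compute_direct_measurement_coverage_spec : Claim_equal_compute_direct_measurement_coverage := by
  intro observable_ids measurement_bases _
  unfold Spec_compute_direct_measurement_coverage
  unfold compute_direct_measurement_coverage compute_direct_measurement_coverage_alt
  simp only []
  set c : String → Bool :=
    fun o => (measurement_bases.map (fun p => p.2)).any
      (fun compatible => PySem.Set.contains compatible o) with hc
  have hcond : ∀ o : String, c o = true ↔ ∃ p ∈ measurement_bases, o ∈ p.2 := by
    intro o
    simp [hc, List.any_map, List.any_eq_true, Function.comp]
  have hcovA :
      measurement_bases.foldl
        (fun cov p => PySem.Set.update cov (PySem.Set.inter (PySem.Set.ofList observable_ids) p.2))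
        PySem.Set.empty
      = PySem.Set.ofList
          (measurement_bases.flatMap (fun p => PySem.Set.inter (PySem.Set.ofList observable_ids) p.2)) := by
    rw [pv_foldl_update]
    exact PySem.Set.update_nil_left _
  rw [hcovA, pv_foldl_classify]
  have hmemA : ∀ o : String,
      o ∈ PySem.Set.ofList
        (measurement_bases.flatMap (fun p => PySem.Set.inter (PySem.Set.ofList observable_ids) p.2))
      ↔ o ∈ observable_ids ∧ ∃ p ∈ measurement_bases, o ∈ p.2 := by
    intro o
    simp only [PySem.Set.mem_ofList, List.mem_flatMap, PySem.Set.mem_inter]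
    constructor
    · rintro ⟨p, hp, ho, hop⟩
      exact ⟨ho, p, hp, hop⟩
    · rintro ⟨ho, p, hp, hop⟩
      exact ⟨p, hp, ho, hop⟩
  refine Prod.ext ?_ ?_
  · apply PySem.List.sorted_eq_sorted_of_perm _ _ _ (fun a b h => h)
    apply (List.perm_ext_iff_of_nodup (PySem.Set.nodup_ofList _) (PySem.Set.nodup_ofList _)).mpr
    intro o
    rw [hmemA, PySem.Set.mem_ofList, List.mem_filter]
    constructor
    · rintro ⟨ho, hex⟩
      exact ⟨ho, (hcond o).mpr hex⟩
    · rintro ⟨ho, hco⟩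
      exact ⟨ho, (hcond o).mp hco⟩
  · apply PySem.List.sorted_eq_sorted_of_perm _ _ _ (fun a b h => h)
    apply (List.perm_ext_iff_of_nodup
      (PySem.Set.nodup_diff _ _ (PySem.Set.nodup_ofList _)) (PySem.Set.nodup_ofList _)).mpr
    intro o
    rw [PySem.Set.mem_diff, hmemA, PySem.Set.mem_ofList, PySem.Set.mem_ofList, List.mem_filter]
    constructor
    · rintro ⟨ho, hnc⟩
      refine ⟨ho, ?_⟩
      simp only [Bool.not_eq_eq_eq_not, Bool.not_true]
      apply Bool.eq_false_iff.mpr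
      intro hb
      exact hnc ⟨ho, (hcond o).mp hb⟩
    · rintro ⟨ho, hnb⟩
      refine ⟨ho, fun hcontra => ?_⟩
      have hco : c o = true := (hcond o).mpr hcontra.2
      simp only [hc] at hco
      rw [hco] at hnb
      simp at hnb
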